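-- pv_equiv track=rewrite | github.com/phoenixxenon6/ai | openrouter_agent.py | is_trading_related
-- ===== SOURCE A (Python) =====
-- def is_trading_related(text: str) -> bool:
--     """Check if the response is trading/finance related."""
--     trading_keywords = [
--         'trading', 'trade', 'trader', 'market', 'forex', 'stock', 'crypto', 'deriv',
--         'investment', 'profit', 'loss', 'price', 'chart', 'analysis', 'strategy',
--         'portfolio', 'risk', 'money', 'currency', 'exchange', 'buy', 'sell',
--         'bullish', 'bearish', 'technical', 'fundamental', 'trend', 'support',
--         'resistance', 'volatility', 'leverage', 'margin', 'pip', 'spread',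
--         'commodity', 'index', 'indices', 'financial', 'economic', 'broker',
--         'platform', 'mt5', 'binary', 'options', 'cfd', 'deposit', 'withdraw'
--     ]
--
--     text_lower = text.lower()
--     return any(keyword in text_lower for keyword in trading_keywords)
-- ===== SOURCE B (Python) =====
-- _TRADING_KEYWORDS = (
--     "trading trade trader market forex stock crypto deriv "
--     "investment profit loss price chart analysis strategy "
--     "portfolio risk money currency exchange buy sell "
--     "bullish bearish technical fundamental trend support "
--     "resistance volatility leverage margin pip spread "
--     "commodity index indices financial economic broker "
--     "platform mt5 binary options cfd deposit withdraw"
-- ).split()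
--
-- def is_trading_related(text: str) -> bool:
--     """Check if the response is trading/finance related."""
--     # Single left-to-right pass over the lowered text: at each position, test
--     # whether some keyword starts there, instead of one full substring scan per keyword.
--     s = text.lower()
--     return any(s.startswith(tuple(_TRADING_KEYWORDS), i) for i in range(len(s)))
-- ===== Notes on version B (the rewrite author's own statement) =====
-- stated objective: alternative
-- what changed: A runs one full substring scan over the text per keyword; B keeps the keywords as one space-separated string split once at module load, lowers the text once, and makes a single left-to-right pass over positions, testing at each position whether any keyword starts there (str.startswith with the keyword tuple), exiting on the first match.
import Mathlib
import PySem

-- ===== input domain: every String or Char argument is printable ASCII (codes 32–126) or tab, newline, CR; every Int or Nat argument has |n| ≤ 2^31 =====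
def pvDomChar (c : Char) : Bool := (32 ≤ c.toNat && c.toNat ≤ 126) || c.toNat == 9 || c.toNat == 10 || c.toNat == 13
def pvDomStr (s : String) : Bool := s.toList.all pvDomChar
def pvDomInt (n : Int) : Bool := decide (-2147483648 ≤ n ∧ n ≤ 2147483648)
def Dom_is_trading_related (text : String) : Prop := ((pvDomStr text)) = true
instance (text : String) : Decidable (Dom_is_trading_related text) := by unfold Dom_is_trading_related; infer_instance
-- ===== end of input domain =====

-- B replaces A's one-full-substring-scan-per-keyword with a single left-to-right pass that
-- tests at each position whether some keyword starts there (objective: alternative, same cost class).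

-- ===== PORT A =====
def pvKeywordsA : List String :=
  ["trading", "trade", "trader", "market", "forex", "stock", "crypto", "deriv",
   "investment", "profit", "loss", "price", "chart", "analysis", "strategy",
   "portfolio", "risk", "money", "currency", "exchange", "buy", "sell",
   "bullish", "bearish", "technical", "fundamental", "trend", "support",
   "resistance", "volatility", "leverage", "margin", "pip", "spread",
   "commodity", "index", "indices", "financial", "economic", "broker",
   "platform", "mt5", "binary", "options", "cfd", "deposit", "withdraw"]

def is_trading_related (text : String) : Bool :=
  let text_lower := PySem.Str.lower text
  pvKeywordsA.any (fun keyword => PySem.Str.isIn keyword text_lower)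

-- ===== PORT B =====
-- Source B's module-level `"trading trade … withdraw".split()`
def pvKeywordsB : List String :=
  PySem.Str.split₀
    ("trading trade trader market forex stock crypto deriv " ++
     "investment profit loss price chart analysis strategy " ++
     "portfolio risk money currency exchange buy sell " ++
     "bullish bearish technical fundamental trend support " ++
     "resistance volatility leverage margin pip spread " ++
     "commodity index indices financial economic broker " ++
     "platform mt5 binary options cfd deposit withdraw")

-- Source B's generator `any(s.startswith(kws, i) for i in range(len(s)))`
-- as structural recursion over the suffixes of the lowered text.
def pvScan (kws : List String) : List Char → Bool
  | [] => false
  | c :: rest =>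
    if kws.any (fun k => PySem.Chars.startswith (c :: rest) k.toList) then true
    else pvScan kws rest

def is_trading_related_alt (text : String) : Bool :=
  pvScan pvKeywordsB (PySem.Str.lower text).toList

-- ===== PRECONDITION & SPEC =====
def Spec_is_trading_related (text : String) (out : Bool) : Prop := out = is_trading_related_alt text
instance (text : String) (out : Bool) : Decidable (Spec_is_trading_related text out) := by unfold Spec_is_trading_related; infer_instance

-- ===== CLAIM (what is proved, stated in full; the proofs are below) =====
def Claim_equal_is_trading_related : Prop := ∀ (text : String), Dom_is_trading_related text → Spec_is_trading_related text (is_trading_related text)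

-- ===== LEMMAS AND PROOFS =====

theorem pvScan_iff (kws : List String) (h : ∀ k ∈ kws, k.toList ≠ []) :
    ∀ s : List Char, pvScan kws s = true ↔ ∃ k ∈ kws, k.toList <:+: s := by
  intro s
  induction s with
  | nil =>
    simp only [pvScan, List.infix_nil]
    constructor
    · intro hf; exact absurd hf (by simp)
    · rintro ⟨k, hk, hke⟩; exact absurd hke (h k hk)
  | cons c rest ih =>
    simp only [pvScan]
    by_cases hx : kws.any (fun k => PySem.Chars.startswith (c :: rest) k.toList) = true
    · rw [if_pos hx]
      simp only [true_iff]
      rcases List.any_eq_true.mp hx with ⟨k, hk, hks⟩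
      exact ⟨k, hk, ((PySem.Chars.startswith_iff _ _).mp hks).isInfix⟩
    · rw [if_neg hx, ih]
      constructor
      · rintro ⟨k, hk, hki⟩
        exact ⟨k, hk, List.infix_cons_iff.mpr (Or.inr hki)⟩
      · rintro ⟨k, hk, hki⟩
        rcases List.infix_cons_iff.mp hki with hp | hi
        · exact absurd (List.any_eq_true.mpr ⟨k, hk, (PySem.Chars.startswith_iff _ _).mpr hp⟩) hx
        · exact ⟨k, hk, hi⟩

set_option maxRecDepth 8000 in
theorem pvKeywordsB_eq : pvKeywordsB = pvKeywordsA := by decide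

theorem pvKeywordsA_nonempty : ∀ k ∈ pvKeywordsA, k.toList ≠ [] := by decide

-- ===== VERDICT (by name: the statement is the Claim_ definition above) =====
theorem is_trading_related_spec : Claim_equal_is_trading_related := by
  intro text _
  show is_trading_related text = is_trading_related_alt text
  unfold is_trading_related is_trading_related_alt
  rw [pvKeywordsB_eq, Bool.eq_iff_iff]
  rw [pvScan_iff pvKeywordsA pvKeywordsA_nonempty]
  rw [List.any_eq_true]
  constructor
  · rintro ⟨k, hk, hki⟩
    exact ⟨k, hk, (PySem.Str.isIn_iff_infix _ _).mp hki⟩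
  · rintro ⟨k, hk, hki⟩
    exact ⟨k, hk, (PySem.Str.isIn_iff_infix _ _).mpr hki⟩
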